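-- pv_equiv track=rewrite | github.com/itaiby/y3--cyber- | W1/Q2.py | hex_summary
-- ===== SOURCE A (Python) =====
-- def hex_summary(str):
--     # dict for translating hex to int
--     hex = {"0": 0, "1": 1, "2": 2, "3": 3, "4": 4, "5": 5, "6": 6, "7": 7, "8": 8, "9": 9, "a": 10, "b": 11, "c": 12, "d": 13, "e": 14, "f": 15}
--     # handling uppercase chars too
--     str = str.lower()
--     # creating another str from who to strip as we go along the chars we passed
--     striped_str = str
--     sum = 0
--     i = 1
--     for ch in str[::-1]:
--         try:
--             striped_str = striped_str.rstrip(ch)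
--             sum += hex[ch] * i
--             i *= 16
--         except KeyError:
--             return sum + hex_summary(striped_str)
--     return sum
-- ===== SOURCE B (Python) =====
-- def hex_summary(str):
--     # single left-to-right pass: accumulate each maximal run of hex digits
--     # as a base-16 value, flushing it into the total at every non-hex char
--     digits = "0123456789abcdef"
--     total = 0
--     value = 0
--     for ch in str.lower():
--         k = digits.find(ch)
--         if k >= 0:
--             value = value * 16 + k
--         else:
--             total += value
--             value = 0
--     return total + value
-- ===== Notes on version B (the rewrite author's own statement) =====
-- stated objective: alternative
-- what changed: A recursively scans the reversed string, rstrip-copying the working string at every character and restarting on each non-hex separator; B makes one left-to-right pass that accumulates each maximal run of hex digits as a base-16 value and flushes it into a running total at every non-hex character.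
import Mathlib
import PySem

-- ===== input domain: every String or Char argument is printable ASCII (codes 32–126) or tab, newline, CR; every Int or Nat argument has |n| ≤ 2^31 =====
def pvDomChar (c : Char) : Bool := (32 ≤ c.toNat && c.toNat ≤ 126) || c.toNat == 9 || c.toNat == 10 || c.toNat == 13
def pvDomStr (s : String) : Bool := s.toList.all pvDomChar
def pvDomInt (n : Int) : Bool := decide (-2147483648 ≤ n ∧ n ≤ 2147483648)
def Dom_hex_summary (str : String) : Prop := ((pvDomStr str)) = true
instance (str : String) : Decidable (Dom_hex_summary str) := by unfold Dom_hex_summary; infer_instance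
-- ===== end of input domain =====

-- B replaces A's recursive reversed-scan-with-rstrip by a single left-to-right fold that
-- accumulates each maximal run of hex digits as a base-16 value and flushes it into a
-- running total at each non-hex character (objective: alternative, one pass, no recursion).


-- ===== PORT A =====
-- the dict literal 'hex', as an association list (first-match lookup; none = KeyError)
def pvHexPairs : List (Char × Int) :=
  [('0', 0), ('1', 1), ('2', 2), ('3', 3), ('4', 4), ('5', 5), ('6', 6), ('7', 7),
   ('8', 8), ('9', 9), ('a', 10), ('b', 11), ('c', 12), ('d', 13), ('e', 14), ('f', 15)]

-- Python's s.rstrip(ch) for a one-char argument: drop every trailing copy of ch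
-- (hand port, exact: List.rdropWhile p s is (s.reverse.dropWhile p).reverse by definition)
def pvRstrip (s : List Char) (ch : Char) : List Char :=
  List.rdropWhile (fun c => c == ch) s

-- the 'for ch in str[::-1]' loop with its early return:
-- inl sum = the loop ran to the end; inr (sum, striped) = KeyError was raised after this
-- iteration's rstrip, i.e. 'return sum + hex_summary(striped_str)' fires with this state
def pvLoopA : List Char → Int → Int → List Char → Int ⊕ (Int × List Char)
  | _, sum, _, [] => Sum.inl sum
  | striped, sum, i, ch :: rest =>
    let striped' := pvRstrip striped ch
    match pvHexPairs.lookup ch with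
    | some v => pvLoopA striped' (sum + v * i) (i * 16) rest
    | none => Sum.inr (sum, striped')

theorem pvRstrip_length_le (s : List Char) (c : Char) : (pvRstrip s c).length ≤ s.length :=
  (List.rdropWhile_prefix _ s).length_le

theorem pvLoopA_inr_le : ∀ (cs striped : List Char) (sum i s : Int) (st : List Char),
    pvLoopA striped sum i cs = Sum.inr (s, st) → st.length ≤ striped.length := by
  intro cs
  induction cs with
  | nil => intro striped sum i s st h; simp [pvLoopA] at h
  | cons ch rest ih =>
    intro striped sum i s st h
    simp only [pvLoopA] at h
    cases hk : pvHexPairs.lookup ch with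
    | some v =>
      rw [hk] at h
      exact le_trans (ih _ _ _ _ _ h) (pvRstrip_length_le _ _)
    | none =>
      rw [hk] at h
      cases h
      exact pvRstrip_length_le _ _

theorem pvLoopA_top_lt (low : List Char) (s : Int) (st : List Char)
    (h : pvLoopA low 0 1 low.reverse = Sum.inr (s, st)) : st.length < low.length := by
  rcases List.eq_nil_or_concat' low with rfl | ⟨l₀, c, rfl⟩
  · simp [pvLoopA] at h
  · rw [List.reverse_concat] at h
    simp only [pvLoopA] at h
    have hlen : (pvRstrip (l₀ ++ [c]) c).length ≤ l₀.length := by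
      rw [pvRstrip, List.rdropWhile_concat_pos _ _ _ (by simp)]
      exact (List.rdropWhile_prefix _ l₀).length_le
    cases hk : pvHexPairs.lookup c with
    | some v =>
      rw [hk] at h
      have := pvLoopA_inr_le _ _ _ _ _ _ h
      calc st.length ≤ _ := this
        _ ≤ l₀.length := hlen
        _ < (l₀ ++ [c]).length := by simp
    | none =>
      rw [hk] at h
      cases h
      calc (pvRstrip (l₀ ++ [c]) c).length ≤ l₀.length := hlen
        _ < (l₀ ++ [c]).length := by simp

def pvHexCore (l : List Char) : Int :=
  match h : pvLoopA (PySem.Chars.lower l) 0 1 (PySem.Chars.lower l).reverse with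
  | Sum.inl s => s
  | Sum.inr (s, st) => s + pvHexCore st
termination_by l.length
decreasing_by
  have h1 := pvLoopA_top_lt _ _ _ h
  have h2 : (PySem.Chars.lower l).length = l.length := by
    simp [PySem.Chars.lower]
  omega

def hex_summary (str : String) : Int := pvHexCore str.toList

-- ===== PORT B =====
-- the string constant 'digits' = "0123456789abcdef"
def pvDigits : List Char :=
  ['0', '1', '2', '3', '4', '5', '6', '7', '8', '9', 'a', 'b', 'c', 'd', 'e', 'f']

-- one loop iteration of B: k = digits.find(ch); hex digit extends the run value, anything
-- else flushes the run value into the total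
def pvStepB (tv : Int × Int) (ch : Char) : Int × Int :=
  let k := PySem.Chars.find pvDigits [ch]
  if 0 ≤ k then (tv.1, tv.2 * 16 + k) else (tv.1 + tv.2, 0)

def hex_summary_alt (str : String) : Int :=
  let r := (PySem.Chars.lower str.toList).foldl pvStepB (0, 0)
  r.1 + r.2

-- ===== PRECONDITION & SPEC =====
def Spec_hex_summary (str : String) (out : Int) : Prop := out = hex_summary_alt str
instance (str : String) (out : Int) : Decidable (Spec_hex_summary str out) := by unfold Spec_hex_summary; infer_instance

-- ===== CLAIM (what is proved, stated in full; the proofs are below) =====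
def Claim_equal_hex_summary : Prop := ∀ (str : String), Dom_hex_summary str → Spec_hex_summary str (hex_summary str)

-- ===== LEMMAS AND PROOFS =====

-- abbreviation for B's accumulated result
def pvBSum (l : List Char) : Int :=
  (l.foldl pvStepB (0, 0)).1 + (l.foldl pvStepB (0, 0)).2

-- the weighted sum A's loop accumulates while scanning a (reversed) hex run
def pvG : List Char → Int → Int
  | [], _ => 0
  | c :: r, i => (pvHexPairs.lookup c).getD 0 * i + pvG r (i * 16)

theorem pv_lookup_none (c : Char) (h : c ∉ pvDigits) : pvHexPairs.lookup c = none := by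
  simp only [pvDigits, List.mem_cons, not_or] at h
  obtain ⟨h0,h1,h2,h3,h4,h5,h6,h7,h8,h9,ha,hb,hc,hd,he,hf,-⟩ := h
  simp [pvHexPairs, List.lookup, beq_eq_false_iff_ne.mpr h0, beq_eq_false_iff_ne.mpr h1,
    beq_eq_false_iff_ne.mpr h2, beq_eq_false_iff_ne.mpr h3, beq_eq_false_iff_ne.mpr h4,
    beq_eq_false_iff_ne.mpr h5, beq_eq_false_iff_ne.mpr h6, beq_eq_false_iff_ne.mpr h7,
    beq_eq_false_iff_ne.mpr h8, beq_eq_false_iff_ne.mpr h9, beq_eq_false_iff_ne.mpr ha,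
    beq_eq_false_iff_ne.mpr hb, beq_eq_false_iff_ne.mpr hc, beq_eq_false_iff_ne.mpr hd,
    beq_eq_false_iff_ne.mpr he, beq_eq_false_iff_ne.mpr hf]

-- bridge between B's digits.find(ch) and A's dict lookup
theorem pv_find_eq (c : Char) :
    PySem.Chars.find pvDigits [c] = (pvHexPairs.lookup c).getD (-1) := by
  by_cases hc : c ∈ pvDigits
  · fin_cases hc <;> rfl
  · rw [pv_lookup_none c hc,
      (PySem.Chars.find_eq_neg_one_iff _ _).mpr (by simpa [List.singleton_infix_iff] using hc)]
    rfl

theorem pvStepB_eq (tv : Int × Int) (c : Char) :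
    pvStepB tv c = match pvHexPairs.lookup c with
      | some v => (tv.1, tv.2 * 16 + v)
      | none => (tv.1 + tv.2, 0) := by
  by_cases hc : c ∈ pvDigits
  · fin_cases hc <;> rfl
  · rw [pv_lookup_none c hc]
    simp [pvStepB, pv_find_eq, pv_lookup_none c hc]

-- B's fold over an all-hex block accumulates a base-16 value, leaving the total alone
theorem pv_foldB_hex (cs : List Char) (tv : Int × Int)
    (h : ∀ c ∈ cs, (pvHexPairs.lookup c).isSome) :
    cs.foldl pvStepB tv
      = (tv.1, cs.foldl (fun v c => v * 16 + (pvHexPairs.lookup c).getD 0) tv.2) := by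
  induction cs generalizing tv with
  | nil => simp
  | cons c r ih =>
    have hc := h c (by simp)
    cases hk : pvHexPairs.lookup c with
    | none => rw [hk] at hc; simp at hc
    | some v =>
      simp only [List.foldl_cons, pvStepB_eq, hk]
      rw [ih _ (fun x hx => h x (by simp [hx]))]
      simp

-- B's fold over an all-non-hex block only flushes: the combined sum is unchanged
theorem pv_foldB_nonhex (cs : List Char) (tv : Int × Int)
    (h : ∀ c ∈ cs, (pvHexPairs.lookup c).isSome = false) :
    (cs.foldl pvStepB tv).1 + (cs.foldl pvStepB tv).2 = tv.1 + tv.2 := by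
  induction cs generalizing tv with
  | nil => simp
  | cons c r ih =>
    have hc := h c (by simp)
    cases hk : pvHexPairs.lookup c with
    | some v => rw [hk] at hc; simp at hc
    | none =>
      simp only [List.foldl_cons, pvStepB_eq, hk]
      rw [ih _ (fun x hx => h x (by simp [hx]))]
      simp

-- A's loop over an all-hex prefix of the reversed string is a fold: it strips along,
-- adds the weighted digits and scales the weight
theorem pvLoopA_hex_prefix (cs : List Char) (striped : List Char) (sum i : Int)
    (rest : List Char) (h : ∀ c ∈ cs, (pvHexPairs.lookup c).isSome) :
    pvLoopA striped sum i (cs ++ rest)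
      = pvLoopA (cs.foldl pvRstrip striped) (sum + pvG cs i) (i * 16 ^ cs.length) rest := by
  induction cs generalizing striped sum i with
  | nil => simp [pvG]
  | cons c r ih =>
    have hc := h c (by simp)
    cases hk : pvHexPairs.lookup c with
    | none => rw [hk] at hc; simp at hc
    | some v =>
      simp only [List.cons_append, pvLoopA, hk, List.foldl_cons]
      rw [ih _ _ _ (fun x hx => h x (by simp [hx]))]
      have e1 : sum + v * i + pvG r (i * 16) = sum + pvG (c :: r) i := by
        simp [pvG, hk]; ring
      have e2 : i * 16 * 16 ^ r.length = i * 16 ^ (c :: r).length := by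
        simp [pow_succ]; ring
      rw [e1, e2]

theorem pv_rstrip_append_replicate (x : List Char) (c : Char) (m : Nat) :
    pvRstrip (x ++ List.replicate m c) c = pvRstrip x c := by
  induction m with
  | zero => simp
  | succ m ih =>
    rw [List.replicate_succ', ← List.append_assoc, pvRstrip,
      List.rdropWhile_concat_pos _ _ _ (by simp)]
    exact ih

theorem pv_rstrip_eq_self (x : List Char) (c : Char)
    (h : ∀ hx : x ≠ [], (x.getLast hx == c) = false) : pvRstrip x c = x := by
  rw [pvRstrip, List.rdropWhile_eq_self_iff]
  intro hx
  simp [h hx]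

theorem pv_foldl_rstrip_replicate (x : List Char) (c : Char) (m : Nat)
    (h : pvRstrip x c = x) : (List.replicate m c).foldl pvRstrip x = x := by
  induction m with
  | zero => rfl
  | succ m ih => rw [List.replicate_succ, List.foldl_cons, h]; exact ih

-- the rstrip accumulation over a reversed all-hex run eats exactly that run
theorem pv_stripFold_run : ∀ (t p : List Char),
    (∀ c ∈ t, (pvHexPairs.lookup c).isSome) →
    (∀ h : p ≠ [], (pvHexPairs.lookup (p.getLast h)).isSome = false) →
    t.reverse.foldl pvRstrip (p ++ t) = p := by
  suffices H : ∀ (n : Nat) (t p : List Char), t.length = n →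
      (∀ c ∈ t, (pvHexPairs.lookup c).isSome) →
      (∀ h : p ≠ [], (pvHexPairs.lookup (p.getLast h)).isSome = false) →
      t.reverse.foldl pvRstrip (p ++ t) = p by
    exact fun t p ht hp => H t.length t p rfl ht hp
  intro n
  induction n using Nat.strong_induction_on with
  | _ n IH =>
  intro t p hn ht hp
  rcases List.eq_nil_or_concat' t with rfl | ⟨t₀, c, rfl⟩
  · simp
  · -- c is the last char of t; split t into u ++ (maximal trailing block of c's)
    set t1 : List Char := t₀ ++ [c] with ht1
    set u : List Char := List.rdropWhile (fun x => x == c) t1 with hu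
    set rep : List Char := List.rtakeWhile (fun x => x == c) t1 with hrep
    have hsplit : u ++ rep = t1 := List.rdropWhile_append_rtakeWhile
    have hreprep : rep = List.replicate rep.length c :=
      List.eq_replicate_of_mem (fun b hb => by
        have := List.mem_rtakeWhile_imp hb
        exact beq_iff_eq.mp this)
    have hrepne : rep ≠ [] := by
      intro hcon
      rw [List.rtakeWhile_eq_nil_iff] at hcon
      exact hcon (by simp [ht1]) (by simp [ht1])
    have hulast : ∀ hx : u ≠ [], (u.getLast hx == c) = false := by
      intro hx
      have := List.rdropWhile_last_not (fun x => x == c) t1 (hu ▸ hx)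
      simpa using this
    have huhex : ∀ x ∈ u, (pvHexPairs.lookup x).isSome := fun x hx =>
      ht x ((List.rdropWhile_prefix _ _).subset hx)
    have hchex : (pvHexPairs.lookup c).isSome := ht c (by simp [ht1])
    -- the combined list p ++ u has no trailing c
    have hpu' : pvRstrip (p ++ u) c = p ++ u := by
      rcases List.eq_nil_or_concat' u with hu0 | ⟨u₀, d, hud⟩
      · rw [hu0, List.append_nil]
        apply pv_rstrip_eq_self
        intro hx
        have hplast := hp hx
        apply beq_eq_false_iff_ne.mpr
        intro hcon
        rw [hcon] at hplast
        rw [hplast] at hchex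
        cases hchex
      · apply pv_rstrip_eq_self
        intro hx
        have hune : u ≠ [] := by simp [hud]
        rw [List.getLast_append_right hune]
        exact hulast hune
    have hlen : u.length + rep.length = t1.length := by
      rw [← hsplit]; simp
    have hrl : 1 ≤ rep.length := by
      cases hrep0 : rep with
      | nil => exact absurd hrep0 hrepne
      | cons a b => simp
    -- rewrite the fold
    have hrev : t1.reverse = List.replicate rep.length c ++ u.reverse := by
      rw [← hsplit, List.reverse_append, ← hreprep]
      congr 1
      rw [hreprep, List.reverse_replicate]
    rw [hrev, List.foldl_append]
    -- first block: the replicate of c's collapses p ++ t1 to p ++ u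
    have hblock : (List.replicate rep.length c).foldl pvRstrip (p ++ t1) = p ++ u := by
      obtain ⟨m, hm⟩ : ∃ m, rep.length = m + 1 := ⟨rep.length - 1, by omega⟩
      rw [hm, List.replicate_succ, List.foldl_cons]
      have h1 : pvRstrip (p ++ t1) c = p ++ u := by
        rw [← hsplit, hreprep, ← List.append_assoc, pv_rstrip_append_replicate, hpu']
      rw [h1]
      exact pv_foldl_rstrip_replicate _ _ _ hpu'
    rw [hblock]
    -- second block: induction on the strictly shorter u
    exact IH u.length (by omega) u p rfl huhex hp

-- the weighted reversed-run sum is the base-16 value of the run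
theorem pvG_reverse (t : List Char) (i : Int) :
    pvG t.reverse i = (t.foldl (fun v c => v * 16 + (pvHexPairs.lookup c).getD 0) 0) * i := by
  induction t using List.reverseRecOn generalizing i with
  | nil => simp [pvG]
  | append_singleton t₀ c ih =>
    rw [List.reverse_append]
    simp only [List.reverse_singleton, List.singleton_append, pvG, List.foldl_append,
      List.foldl_cons, List.foldl_nil]
    rw [ih]
    ring

-- main induction: on strings fixed by lower, A's recursion equals B's single fold
theorem pv_main : ∀ (n : Nat) (l : List Char), l.length ≤ n →
    (∀ c ∈ l, PySem.Chars.lowerChar c = c) → pvHexCore l = pvBSum l := by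
  intro n
  induction n with
  | zero =>
    intro l hl _
    have : l = [] := List.length_eq_zero_iff.mp (Nat.le_zero.mp hl)
    subst this
    rw [pvHexCore]
    simp [PySem.Chars.lower, pvLoopA, pvBSum]
  | succ n IH =>
    intro l hl hfix
    have hlow : PySem.Chars.lower l = l := by
      unfold PySem.Chars.lower
      exact (List.map_congr_left (fun a ha => hfix a ha)).trans (List.map_id l)
    rw [pvHexCore, hlow]
    set u : List Char := List.rdropWhile (fun c => (pvHexPairs.lookup c).isSome) l with hu
    set t : List Char := List.rtakeWhile (fun c => (pvHexPairs.lookup c).isSome) l with htdef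
    have hsplit : u ++ t = l := List.rdropWhile_append_rtakeWhile
    have htmem : ∀ c ∈ t, (pvHexPairs.lookup c).isSome := fun c hc =>
      List.mem_rtakeWhile_imp (p := fun c => (pvHexPairs.lookup c).isSome) (htdef ▸ hc)
    by_cases hune : u = []
    · -- the whole string is hex digits: the loop runs to the end
      have hlt : l = t := by rw [← hsplit, hune, List.nil_append]
      have hloop : pvLoopA l 0 1 l.reverse = Sum.inl (0 + pvG l.reverse 1) := by
        have := pvLoopA_hex_prefix l.reverse l 0 1 [] (by
          intro c hc
          exact htmem c (by rw [← hlt]; simpa using hc))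
        rw [List.append_nil] at this
        rw [this]
        rfl
      split
      case h_1 s heq =>
        rw [hloop] at heq
        cases heq
        have hB : l.foldl pvStepB (0, 0)
            = ((0 : Int), l.foldl (fun v c => v * 16 + (pvHexPairs.lookup c).getD 0) 0) := by
          exact pv_foldB_hex l (0, 0) (fun c hc => htmem c (by rw [← hlt]; exact hc))
        have := pvG_reverse l 1
        unfold pvBSum
        rw [hB, this]
        ring
      case h_2 s st heq =>
        rw [hloop] at heq
        cases heq
    · -- l = q ++ [sep] ++ t with sep the last non-hex char
      obtain ⟨q, sep, huq⟩ : ∃ q sep, u = q ++ [sep] := by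
        rcases List.eq_nil_or_concat' u with h0 | ⟨q, sep, hq⟩
        · exact absurd h0 hune
        · exact ⟨q, sep, hq⟩
      have hsep : (pvHexPairs.lookup sep).isSome = false := by
        have := List.rdropWhile_last_not (fun c => (pvHexPairs.lookup c).isSome) l (hu ▸ hune)
        have hlast : u.getLast hune = sep := by simp [huq]
        rw [hlast] at this
        exact Bool.eq_false_iff.mpr this
      have hsepnone : pvHexPairs.lookup sep = none := by
        cases hk : pvHexPairs.lookup sep with
        | none => rfl
        | some v => rw [hk] at hsep; simp at hsep
      have hrev : l.reverse = t.reverse ++ (sep :: q.reverse) := by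
        rw [← hsplit, huq]
        simp
      have hstrip : t.reverse.foldl pvRstrip l = u := by
        have := pv_stripFold_run t u htmem (by
          intro h'
          have hlast : u.getLast h' = sep := by simp [huq]
          rw [hlast]; exact hsep)
        rw [hsplit] at this
        exact this
      have hloop : pvLoopA l 0 1 l.reverse
          = Sum.inr (0 + pvG t.reverse 1, pvRstrip u sep) := by
        rw [hrev, pvLoopA_hex_prefix t.reverse l 0 1 _ (by
          intro c hc; exact htmem c (by simpa using hc)), hstrip]
        simp only [pvLoopA, hsepnone]
      split
      case h_1 s heq =>
        rw [hloop] at heq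
        cases heq
      case h_2 s st heq =>
        rw [hloop] at heq
        injection heq with heq1
        injection heq1 with hs hst
        -- the recursive argument: q with its trailing copies of sep removed
        have hst' : st = List.rdropWhile (fun c => c == sep) q := by
          rw [← hst, huq, pvRstrip, List.rdropWhile_concat_pos _ _ _ (by simp)]
        have hqpref : st.length ≤ q.length := by
          rw [hst']
          exact (List.rdropWhile_prefix _ _).length_le
        have hulen : u.length ≤ l.length := by
          rw [← hsplit]; simp
        have hstlen : st.length ≤ n := by
          rw [huq] at hulen
          simp at hulen
          omega
        have hstsub : ∀ c ∈ st, c ∈ l := by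
          intro c hc
          rw [hst'] at hc
          have h1 : c ∈ q := (List.rdropWhile_prefix _ _).subset hc
          have h2 : c ∈ u := by rw [huq]; simp [h1]
          rw [← hsplit]; simp [h2]
        have hrec := IH st hstlen (fun c hc => hfix c (hstsub c hc))
        rw [hrec]
        -- now compare the two accumulations
        have hqfold := pv_foldB_nonhex (List.rtakeWhile (fun c => c == sep) q)
          (st.foldl pvStepB (0, 0)) (by
            intro c hc
            have := List.mem_rtakeWhile_imp hc
            rw [beq_iff_eq.mp this]
            exact hsep)
        have hq_split : st ++ List.rtakeWhile (fun c => c == sep) q = q := by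
          rw [hst']; exact List.rdropWhile_append_rtakeWhile
        have hqsum : (q.foldl pvStepB (0, 0)).1 + (q.foldl pvStepB (0, 0)).2 = pvBSum st := by
          rw [← hq_split, List.foldl_append]
          unfold pvBSum
          rw [hqfold]
        -- B's fold over l = q ++ [sep] ++ t
        have hlfold : l.foldl pvStepB (0, 0)
            = ((q.foldl pvStepB (0, 0)).1 + (q.foldl pvStepB (0, 0)).2,
               t.foldl (fun v c => v * 16 + (pvHexPairs.lookup c).getD 0) 0) := by
          rw [← hsplit, huq, List.append_assoc, List.foldl_append, List.foldl_append]
          rw [List.foldl_cons, List.foldl_nil, pvStepB_eq]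
          rw [hsepnone]
          exact pv_foldB_hex t _ htmem
        unfold pvBSum
        rw [hlfold, ← hs, pvG_reverse]
        simp only [hqsum]
        unfold pvBSum
        ring

theorem pv_key (a b : Char) : a ≤ b ↔ a.toNat ≤ b.toNat := by
  rw [Char.le_def, UInt32.le_iff_toNat_le]; rfl

theorem pv_lowerChar_idem (c : Char) :
    PySem.Chars.lowerChar (PySem.Chars.lowerChar c) = PySem.Chars.lowerChar c := by
  by_cases h : PySem.Chars.isupper c = true
  · have h1 : 65 ≤ c.toNat ∧ c.toNat ≤ 90 := by
      unfold PySem.Chars.isupper at h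
      rw [Bool.and_eq_true, decide_eq_true_iff, decide_eq_true_iff, pv_key, pv_key] at h
      exact ⟨h.1, h.2⟩
    have hY : (Char.ofNat (c.toNat + 32)).toNat = c.toNat + 32 := by
      rw [Char.toNat_ofNat, if_pos]
      unfold Nat.isValidChar
      omega
    have h2 : PySem.Chars.lowerChar c = Char.ofNat (c.toNat + 32) := by
      unfold PySem.Chars.lowerChar
      rw [if_pos h]
    have hnot : PySem.Chars.isupper (Char.ofNat (c.toNat + 32)) = false := by
      unfold PySem.Chars.isupper
      rw [Bool.and_eq_false_iff]
      right
      rw [decide_eq_false_iff_not, pv_key, hY]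
      have hz : 'Z'.toNat = 90 := by decide
      omega
    rw [h2]
    unfold PySem.Chars.lowerChar
    rw [if_neg (by simp [hnot])]
  · have hc : PySem.Chars.lowerChar c = c := by
      unfold PySem.Chars.lowerChar
      rw [if_neg h]
    rw [hc, hc]

theorem pv_core_eq (l : List Char) : pvHexCore l = pvBSum (PySem.Chars.lower l) := by
  have hfix : ∀ c ∈ PySem.Chars.lower l, PySem.Chars.lowerChar c = c := by
    intro c hc
    unfold PySem.Chars.lower at hc
    obtain ⟨a, -, rfl⟩ := List.mem_map.mp hc
    exact pv_lowerChar_idem a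
  have hid : PySem.Chars.lower (PySem.Chars.lower l) = PySem.Chars.lower l := by
    unfold PySem.Chars.lower
    rw [List.map_map]
    exact List.map_congr_left (fun a _ => pv_lowerChar_idem a)
  have step : pvHexCore l = pvHexCore (PySem.Chars.lower l) := by
    conv_lhs => rw [pvHexCore]
    conv_rhs => rw [pvHexCore]
    rw [hid]
  rw [step]
  exact pv_main (PySem.Chars.lower l).length _ le_rfl hfix

-- ===== VERDICT (by name: the statement is the Claim_ definition above) =====
theorem hex_summary_spec : Claim_equal_hex_summary := by
  intro str _
  show hex_summary str = hex_summary_alt str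
  simpa [hex_summary, hex_summary_alt, pvBSum] using pv_core_eq str.toList
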